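-- pv_equiv track=rewrite | github.com/yulhee741/Algorithm-Python | 우테코/Q1.py | solution
-- ===== SOURCE A (Python) =====
-- def solution(time, plans):
--     answer = ''
--     total = 0
--     for plan in plans:
--         place, start, arrive = plan[0], plan[1], plan[2]
--
--         if start[-2:] == "PM":  # 출발 시간이 오후일 때
--             if int(start[:-2]) < 6:
--                 total += 6 - int(start[:-2])  # 써야할 휴가 시간 계산
--         elif start[-2:] == "AM":  # 출발 시간이 오전일 때
--             total += 18 - int(start[:-2])  # 써야할 휴가 시간 계산
--
--         if arrive[-2:] == "PM":
--             if int(arrive[:-2]) > 1: # 도착 시간이 오후 1시를 넘었을 때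
--                 total += int(arrive[:-2]) - 1  # 써야할 휴가 시간 계산
--
--         if total <= time:
--             answer = place
--
--     return answer
-- ===== SOURCE B (Python) =====
-- def _delta(plan):
--     start, arrive = plan[1], plan[2]
--     d = 0
--     if start[-2:] == "PM":
--         h = int(start[:-2])
--         if h < 6:
--             d += 6 - h
--     elif start[-2:] == "AM":
--         d += 18 - int(start[:-2])
--     if arrive[-2:] == "PM":
--         h = int(arrive[:-2])
--         if h > 1:
--             d += h - 1
--     return d
--
-- def solution(time, plans):
--     sums = []
--     t = 0
--     for plan in plans:
--         t += _delta(plan)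
--         sums.append(t)
--     for i in range(len(plans) - 1, -1, -1):
--         if sums[i] <= time:
--             return plans[i][0]
--     return ''
-- ===== Notes on version B (the rewrite author's own statement) =====
-- stated objective: alternative
-- what changed: B separates the per-plan vacation-delta computation into a helper, builds the list of prefix sums once, and then scans backwards returning the place at the last index whose cumulative total is <= time, instead of A's single forward loop that keeps overwriting an answer accumulator.
import Mathlib
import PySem

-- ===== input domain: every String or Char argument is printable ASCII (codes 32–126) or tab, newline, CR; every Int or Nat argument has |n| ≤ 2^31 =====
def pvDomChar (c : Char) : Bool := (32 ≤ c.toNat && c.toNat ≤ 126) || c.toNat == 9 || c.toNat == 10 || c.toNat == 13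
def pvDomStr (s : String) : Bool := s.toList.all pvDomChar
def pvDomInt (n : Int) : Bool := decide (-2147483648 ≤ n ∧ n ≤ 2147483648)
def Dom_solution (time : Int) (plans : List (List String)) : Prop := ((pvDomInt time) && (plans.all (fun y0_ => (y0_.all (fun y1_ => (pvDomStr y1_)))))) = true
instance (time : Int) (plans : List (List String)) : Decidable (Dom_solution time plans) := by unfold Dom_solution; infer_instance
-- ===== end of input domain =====

-- B reorganises A's single forward loop into a per-plan delta helper, an explicit prefix-sum list,
-- and a backward scan for the last index whose cumulative total is ≤ time (objective: alternative decomposition).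

-- ===== PORT A =====
-- one iteration of A's loop over the state (answer, total)
def aStep (time : Int) (st : String × Int) (plan : List String) : String × Int :=
  let place := PySem.List.pyGetD plan 0 ""
  let start := PySem.List.pyGetD plan 1 ""
  let arrive := PySem.List.pyGetD plan 2 ""
  let total := st.2
  let total :=
    if PySem.Str.slice start (some (-2)) none = "PM" then
      if (PySem.Int.ofStr? (PySem.Str.slice start none (some (-2)))).getD 0 < 6 then
        total + (6 - (PySem.Int.ofStr? (PySem.Str.slice start none (some (-2)))).getD 0)
      else total
    else if PySem.Str.slice start (some (-2)) none = "AM" then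
      total + (18 - (PySem.Int.ofStr? (PySem.Str.slice start none (some (-2)))).getD 0)
    else total
  let total :=
    if PySem.Str.slice arrive (some (-2)) none = "PM" then
      if 1 < (PySem.Int.ofStr? (PySem.Str.slice arrive none (some (-2)))).getD 0 then
        total + ((PySem.Int.ofStr? (PySem.Str.slice arrive none (some (-2)))).getD 0 - 1)
      else total
    else total
  (if total ≤ time then place else st.1, total)

def solution (time : Int) (plans : List (List String)) : String :=
  (plans.foldl (aStep time) ("", 0)).1

-- ===== PORT B =====
-- port of Source B's _delta
def deltaPlan (plan : List String) : Int :=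
  let start := PySem.List.pyGetD plan 1 ""
  let arrive := PySem.List.pyGetD plan 2 ""
  let d1 :=
    if PySem.Str.slice start (some (-2)) none = "PM" then
      if (PySem.Int.ofStr? (PySem.Str.slice start none (some (-2)))).getD 0 < 6 then
        6 - (PySem.Int.ofStr? (PySem.Str.slice start none (some (-2)))).getD 0
      else 0
    else if PySem.Str.slice start (some (-2)) none = "AM" then
      18 - (PySem.Int.ofStr? (PySem.Str.slice start none (some (-2)))).getD 0
    else 0
  let d2 :=
    if PySem.Str.slice arrive (some (-2)) none = "PM" then
      if 1 < (PySem.Int.ofStr? (PySem.Str.slice arrive none (some (-2)))).getD 0 then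
        (PySem.Int.ofStr? (PySem.Str.slice arrive none (some (-2)))).getD 0 - 1
      else 0
    else 0
  d1 + d2

-- Source B's first loop: the running prefix sums, appended one by one
def prefixSums (plans : List (List String)) : List Int :=
  (plans.foldl (fun (acc : List Int × Int) p =>
     let t := acc.2 + deltaPlan p
     (acc.1 ++ [t], t)) ([], 0)).1

-- Source B's backward index loop with early return, as a search over the reversed (sum, plan) pairs
def findBack (time : Int) : List (Int × List String) → Option String
  | [] => none
  | (s, p) :: rest =>
    if s ≤ time then some (PySem.List.pyGetD p 0 "") else findBack time rest

def solution_alt (time : Int) (plans : List (List String)) : String :=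
  (findBack time (((prefixSums plans).zip plans).reverse)).getD ""

-- ===== PRECONDITION & SPEC =====
-- Pre_ excludes exactly the inputs on which Python A raises: a plan shorter than 3 entries
-- (IndexError) or a start/arrive string whose branch calls int() on a non-int-like prefix (ValueError).
def okPlan (plan : List String) : Bool :=
  decide (3 ≤ plan.length) &&
  (!(PySem.Str.slice (plan.getD 1 "") (some (-2)) none == "PM" ||
     PySem.Str.slice (plan.getD 1 "") (some (-2)) none == "AM") ||
   (PySem.Int.ofStr? (PySem.Str.slice (plan.getD 1 "") none (some (-2)))).isSome) &&
  (!(PySem.Str.slice (plan.getD 2 "") (some (-2)) none == "PM") ||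
   (PySem.Int.ofStr? (PySem.Str.slice (plan.getD 2 "") none (some (-2)))).isSome)

def Pre_solution (time : Int) (plans : List (List String)) : Prop :=
  ∀ plan ∈ plans, okPlan plan = true
instance (time : Int) (plans : List (List String)) : Decidable (Pre_solution time plans) := by
  unfold Pre_solution; infer_instance

def pvWitness_solution : Int × List (List String) := (10, [["home", "2PM", "3PM"]])

def Spec_solution (time : Int) (plans : List (List String)) (out : String) : Prop := out = solution_alt time plans
instance (time : Int) (plans : List (List String)) (out : String) : Decidable (Spec_solution time plans out) := by unfold Spec_solution; infer_instance

-- ===== CLAIM (what is proved, stated in full; the proofs are below) =====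
def Claim_equal_solution : Prop := ∀ (time : Int) (plans : List (List String)), Dom_solution time plans → Pre_solution time plans → Spec_solution time plans (solution time plans)

-- ===== LEMMAS AND PROOFS =====

-- prefix sums starting from t, paired with their plans
def zs (t : Int) : List (List String) → List (Int × List String)
  | [] => []
  | p :: rest => (t + deltaPlan p, p) :: zs (t + deltaPlan p) rest

theorem aStep_eq (time t : Int) (a : String) (p : List String) :
    aStep time (a, t) p =
      (if t + deltaPlan p ≤ time then PySem.List.pyGetD p 0 "" else a, t + deltaPlan p) := by
  unfold aStep deltaPlan
  dsimp only
  split_ifs <;> simp_all <;> omega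

theorem prefixSums_acc (ps : List (List String)) :
    ∀ (acc : List Int) (t : Int),
      (ps.foldl (fun (acc : List Int × Int) p =>
        let t := acc.2 + deltaPlan p
        (acc.1 ++ [t], t)) (acc, t)).1 = acc ++ (zs t ps).map Prod.fst := by
  induction ps with
  | nil => intro acc t; simp [zs]
  | cons p rest ih =>
    intro acc t
    simp only [List.foldl_cons, zs, List.map_cons]
    rw [ih]
    simp

theorem zip_zs (ps : List (List String)) :
    ∀ t, ((zs t ps).map Prod.fst).zip ps = zs t ps := by
  induction ps with
  | nil => intro t; simp [zs]
  | cons p rest ih => intro t; simp [zs, ih]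

theorem findBack_append (time : Int) (x : Int × List String) (l : List (Int × List String)) :
    findBack time (l ++ [x]) =
      match findBack time l with
      | some v => some v
      | none => if x.1 ≤ time then some (PySem.List.pyGetD x.2 0 "") else none := by
  induction l with
  | nil => simp [findBack]
  | cons y ys ih =>
    obtain ⟨s, p⟩ := y
    simp only [List.cons_append, findBack]
    by_cases hs : s ≤ time
    · rw [if_pos hs, if_pos hs]
    · rw [if_neg hs, if_neg hs, ih]

theorem main_lemma (time : Int) (ps : List (List String)) :
    ∀ (t : Int) (a : String),
      (ps.foldl (aStep time) (a, t)).1 = (findBack time (zs t ps).reverse).getD a := by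
  induction ps with
  | nil => intro t a; simp [zs, findBack]
  | cons p rest ih =>
    intro t a
    simp only [List.foldl_cons, aStep_eq, zs, List.reverse_cons]
    rw [ih, findBack_append]
    cases findBack time (zs (t + deltaPlan p) rest).reverse
    · split <;> simp
    · simp

-- ===== VERDICT (by name: the statement is the Claim_ definition above) =====
theorem solution_spec : Claim_equal_solution := by
  intro time plans _ _
  unfold Spec_solution solution solution_alt prefixSums
  rw [prefixSums_acc, List.nil_append, zip_zs]
  exact main_lemma time plans 0 ""
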